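-- pv_equiv track=rewrite | github.com/claibert12/prompt-ops-hub | src/core/guardrails.py | auto_split_large_diff
-- ===== SOURCE A (Python) =====
-- def auto_split_large_diff(diff_str: str, max_size: int = 300) -> list[str]:
--     """Auto-split a large diff into smaller chunks.
--
--     Args:
--         diff_str: Original diff content
--         max_size: Maximum size per chunk
--
--     Returns:
--         List of smaller diff chunks
--     """
--     lines = diff_str.split('\n')
--     chunks = []
--     current_chunk = []
--     current_size = 0
--
--     for line in lines:
--         # If adding this line would exceed max_size, start a new chunk
--         if current_size + 1 > max_size and current_chunk:
--             chunks.append('\n'.join(current_chunk))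
--             current_chunk = []
--             current_size = 0
--
--         current_chunk.append(line)
--         current_size += 1
--
--     # Add the last chunk if it has content
--     if current_chunk:
--         chunks.append('\n'.join(current_chunk))
--
--     return chunks
-- ===== SOURCE B (Python) =====
-- def auto_split_large_diff(diff_str: str, max_size: int = 300) -> list[str]:
--     """Auto-split a large diff into smaller chunks (fixed-size slices)."""
--     step = max_size if max_size > 0 else 1
--     lines = diff_str.split('\n')
--     chunks = []
--     while lines:
--         chunks.append('\n'.join(lines[:step]))
--         lines = lines[step:]
--     return chunks
-- ===== Notes on version B (the rewrite author's own statement) =====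
-- stated objective: simpler
-- what changed: Replaces the streaming accumulator with flush-on-overflow (current_chunk/current_size) by a computed stride and fixed-size slices taken off the front of the line list.
import Mathlib
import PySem

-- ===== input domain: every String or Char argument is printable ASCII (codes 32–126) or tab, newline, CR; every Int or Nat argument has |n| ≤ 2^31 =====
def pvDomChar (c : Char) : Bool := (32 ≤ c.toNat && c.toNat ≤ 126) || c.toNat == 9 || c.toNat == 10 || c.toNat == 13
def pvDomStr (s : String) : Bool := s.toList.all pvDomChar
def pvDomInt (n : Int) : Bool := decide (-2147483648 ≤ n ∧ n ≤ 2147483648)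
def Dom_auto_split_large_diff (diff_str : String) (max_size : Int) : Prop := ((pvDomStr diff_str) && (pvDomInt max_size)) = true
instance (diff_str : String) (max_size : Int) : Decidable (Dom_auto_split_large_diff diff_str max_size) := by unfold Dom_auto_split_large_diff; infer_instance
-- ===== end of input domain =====

-- B replaces A's streaming accumulator (current_chunk/current_size with flush-on-overflow)
-- by a computed stride and fixed-size slices peeled off the front; objective: simpler.

-- ===== PORT A =====
-- the for-loop over lines, state = (chunks, current_chunk, current_size)
def pvLoopA (max_size : Int) : List String → List String × List String × Int → List String × List String × Int
  | [], st => st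
  | line :: rest, (chunks, cur, size) =>
    let st :=
      if size + 1 > max_size ∧ cur ≠ [] then
        (chunks ++ [PySem.Str.join "\n" cur], ([] : List String), (0 : Int))
      else (chunks, cur, size)
    pvLoopA max_size rest (st.1, st.2.1 ++ [line], st.2.2 + 1)

def auto_split_large_diff (diff_str : String) (max_size : Int) : List String :=
  let lines := (PySem.Str.split? diff_str "\n").getD []   -- sep ≠ "", so split? is always some
  let st := pvLoopA max_size lines ([], [], 0)
  if st.2.1 ≠ [] then st.1 ++ [PySem.Str.join "\n" st.2.1] else st.1

-- ===== PORT B =====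
-- the while-loop of Source B: peel `step` lines at a time; `sp + 1` is the step (sp = step - 1,
-- so the nonempty head makes the recursion obviously decreasing)
def pvChunksB (sp : Nat) : List String → List String
  | [] => []
  | l :: rest => PySem.Str.join "\n" (l :: rest.take sp) :: pvChunksB sp (rest.drop sp)
termination_by ls => ls.length
decreasing_by simp

def auto_split_large_diff_alt (diff_str : String) (max_size : Int) : List String :=
  let step : Nat := if max_size > 0 then max_size.toNat else 1
  pvChunksB (step - 1) ((PySem.Str.split? diff_str "\n").getD [])

-- ===== PRECONDITION & SPEC =====
def Spec_auto_split_large_diff (diff_str : String) (max_size : Int) (out : List String) : Prop := out = auto_split_large_diff_alt diff_str max_size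
instance (diff_str : String) (max_size : Int) (out : List String) : Decidable (Spec_auto_split_large_diff diff_str max_size out) := by unfold Spec_auto_split_large_diff; infer_instance

-- ===== CLAIM (what is proved, stated in full; the proofs are below) =====
def Claim_equal_auto_split_large_diff : Prop := ∀ (diff_str : String) (max_size : Int), Dom_auto_split_large_diff diff_str max_size → Spec_auto_split_large_diff diff_str max_size (auto_split_large_diff diff_str max_size)

-- ===== LEMMAS AND PROOFS =====

lemma pvChunksB_nil (sp : Nat) : pvChunksB sp [] = [] := by
  rw [pvChunksB.eq_def]

lemma pvChunksB_cons (sp : Nat) (l : String) (rest : List String) :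
    pvChunksB sp (l :: rest) =
      PySem.Str.join "\n" (l :: rest.take sp) :: pvChunksB sp (rest.drop sp) := by
  rw [pvChunksB.eq_def]


-- A's final flush, as a function of the loop's end state
def pvFin (st : List String × List String × Int) : List String :=
  if st.2.1 ≠ [] then st.1 ++ [PySem.Str.join "\n" st.2.1] else st.1

-- the effective step of both programs
def pvStep (max_size : Int) : Nat := if max_size > 0 then max_size.toNat else 1

lemma pvStep_pos (max_size : Int) : 1 ≤ pvStep max_size := by
  unfold pvStep; split <;> omega

-- A's flush condition, under the invariant size = cur.length with cur nonempty
lemma pvCond (max_size : Int) (k : Nat) (hk : 1 ≤ k) :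
    ((k : Int) + 1 > max_size) ↔ pvStep max_size ≤ k := by
  unfold pvStep; split <;> omega

-- main invariant: from a nonempty current chunk of size ≤ step, the rest of A's loop
-- (plus the final flush) produces exactly B's slices
lemma pvLoopA_eq (max_size : Int) :
    ∀ (lines cur chunks : List String), cur ≠ [] → cur.length ≤ pvStep max_size →
    pvFin (pvLoopA max_size lines (chunks, cur, (cur.length : Int))) =
      chunks ++ PySem.Str.join "\n" (cur ++ lines.take (pvStep max_size - cur.length)) ::
        pvChunksB (pvStep max_size - 1) (lines.drop (pvStep max_size - cur.length)) := by
  intro lines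
  induction lines with
  | nil =>
    intro cur chunks hne _
    simp [pvLoopA, pvFin, hne, pvChunksB_nil]
  | cons line rest ih =>
    intro cur chunks hne hle
    have hstep := pvStep_pos max_size
    have hk : 1 ≤ cur.length := List.length_pos_of_ne_nil hne
    obtain ⟨n, hn⟩ : ∃ n, pvStep max_size = n + 1 := ⟨pvStep max_size - 1, by omega⟩
    by_cases hc : pvStep max_size ≤ cur.length
    · -- flush
      have hcond : ((cur.length : Int) + 1 > max_size) := (pvCond max_size cur.length hk).2 hc
      have heq : cur.length = pvStep max_size := le_antisymm hle hc
      have h1 : pvLoopA max_size (line :: rest) (chunks, cur, (cur.length : Int)) =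
          pvLoopA max_size rest (chunks ++ [PySem.Str.join "\n" cur], [line], 1) := by
        simp [pvLoopA, hcond, hne]
      have h2 := ih [line] (chunks ++ [PySem.Str.join "\n" cur]) (by simp) (by simp; omega)
      norm_num at h2
      rw [h1, h2, heq, hn]
      simp [pvChunksB_cons]
    · -- no flush
      have hcond : ¬ ((cur.length : Int) + 1 > max_size) := fun h => hc ((pvCond max_size cur.length hk).1 h)
      have h1 : pvLoopA max_size (line :: rest) (chunks, cur, (cur.length : Int)) =
          pvLoopA max_size rest (chunks, cur ++ [line], ((cur ++ [line]).length : Int)) := by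
        simp [pvLoopA, hcond]
      have h2 := ih (cur ++ [line]) chunks (by simp) (by simp; omega)
      rw [h1, h2]
      have hge : 1 ≤ pvStep max_size - cur.length := by omega
      obtain ⟨m, hm⟩ : ∃ m, pvStep max_size - cur.length = m + 1 := ⟨pvStep max_size - cur.length - 1, by omega⟩
      have harith : pvStep max_size - (cur ++ [line]).length = m := by simp; omega
      rw [harith, hm]
      simp [List.take_succ_cons, List.drop_succ_cons]

-- the two programs agree on every line list
lemma pvAgree (max_size : Int) (lines : List String) :
    pvFin (pvLoopA max_size lines ([], [], 0)) = pvChunksB (pvStep max_size - 1) lines := by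
  have hstep := pvStep_pos max_size
  obtain ⟨n, hn⟩ : ∃ n, pvStep max_size = n + 1 := ⟨pvStep max_size - 1, by omega⟩
  cases lines with
  | nil => simp [pvLoopA, pvFin, pvChunksB_nil]
  | cons l rest =>
    have h1 : pvLoopA max_size (l :: rest) ([], [], 0) =
        pvLoopA max_size rest ([], [l], 1) := by
      simp [pvLoopA]
    have h2 := pvLoopA_eq max_size rest [l] [] (by simp) (by simp; omega)
    norm_num at h2
    rw [h1, h2, hn]
    simp [pvChunksB_cons]

-- ===== VERDICT (by name: the statement is the Claim_ definition above) =====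
theorem auto_split_large_diff_spec : Claim_equal_auto_split_large_diff := by
  intro diff_str max_size _
  unfold Spec_auto_split_large_diff auto_split_large_diff auto_split_large_diff_alt
  simpa [pvFin, pvStep] using pvAgree max_size ((PySem.Str.split? diff_str "\n").getD [])
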